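-- pv_equiv track=rewrite | github.com/chkrr00k/SRTools | edf.py | getD
-- ===== SOURCE A (Python) =====
-- def getD(t, d, m):
--     result = list()
--     for i in range(len(d)):
--         current = d[i]
--         while current < m:
--             result.append(current)
--             current += t[i]
--     result.sort()
--     return result
-- ===== SOURCE B (Python) =====
-- def getD(t, d, m):
--     # Incremental two-way merge of the sorted arithmetic runs, instead of
--     # appending everything and sorting at the end.
--     result = []
--     for i in range(len(d)):
--         start = d[i]
--         if start < m:
--             run = list(range(start, m, t[i]))
--             merged = []
--             ai = bi = 0
--             while ai < len(result) and bi < len(run):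
--                 if result[ai] <= run[bi]:
--                     merged.append(result[ai]); ai += 1
--                 else:
--                     merged.append(run[bi]); bi += 1
--             merged.extend(result[ai:])
--             merged.extend(run[bi:])
--             result = merged
--     return result
-- ===== Notes on version B (the rewrite author's own statement) =====
-- stated objective: alternative
-- what changed: B replaces A's append-all-then-sort with building each per-index arithmetic run via range() and folding a hand-written two-way merge of sorted lists, so no sort is ever performed.
import Mathlib
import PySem

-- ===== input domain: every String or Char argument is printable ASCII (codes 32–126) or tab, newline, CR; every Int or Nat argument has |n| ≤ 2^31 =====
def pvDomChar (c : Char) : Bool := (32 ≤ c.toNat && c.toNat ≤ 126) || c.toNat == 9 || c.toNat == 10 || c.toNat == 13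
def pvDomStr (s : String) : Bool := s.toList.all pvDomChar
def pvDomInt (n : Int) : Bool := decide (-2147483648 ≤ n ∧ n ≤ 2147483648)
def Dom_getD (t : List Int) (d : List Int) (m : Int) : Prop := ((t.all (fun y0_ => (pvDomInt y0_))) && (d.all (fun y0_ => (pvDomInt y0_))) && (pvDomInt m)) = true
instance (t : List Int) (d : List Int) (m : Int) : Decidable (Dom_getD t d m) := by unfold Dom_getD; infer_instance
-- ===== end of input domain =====

-- B merges the sorted arithmetic runs pairwise instead of sorting the bag of all
-- elements at the end; return-value equivalence is proved on Pre_getD (the inputs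
-- where A terminates without an exception).

-- ===== PORT A =====
-- the inner 'while current < m: result.append(current); current += t[i]' loop;
-- the '0 < step' conjunct only makes the recursion well-founded — Pre_getD
-- guarantees it whenever the loop body would run.
def whileAppend (step : Int) (m : Int) (current : Int) : List Int :=
  if _h : current < m ∧ 0 < step then current :: whileAppend step m (current + step) else []
termination_by (m - current).toNat
decreasing_by omega

def getD (t : List Int) (d : List Int) (m : Int) : List Int :=
  let result := (PySem.List.pyRange 0 (d.length : Int) 1).foldl
    (fun result i =>
      let current := PySem.List.pyGetD d i 0
      result ++ whileAppend (PySem.List.pyGetD t i 0) m current) []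
  PySem.List.sorted result (fun x => x)

-- ===== PORT B =====
-- Source B's hand-written two-way merge of two sorted lists (index loop → structural
-- recursion on the two lists, same comparisons, same tie-break towards the left list)
def merge2 : List Int → List Int → List Int
  | [], b => b
  | a :: as, [] => a :: as
  | a :: as, b :: bs => if a ≤ b then a :: merge2 as (b :: bs) else b :: merge2 (a :: as) bs

def getD_alt (t : List Int) (d : List Int) (m : Int) : List Int :=
  (PySem.List.pyRange 0 (d.length : Int) 1).foldl
    (fun result i =>
      let start := PySem.List.pyGetD d i 0
      if start < m then
        merge2 result (PySem.List.pyRange start m (PySem.List.pyGetD t i 0))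
      else result) []

-- ===== PRECONDITION & SPEC =====
-- exactly the inputs on which A returns: whenever d[i] < m the loop body runs, so
-- t[i] must exist (else IndexError) and be positive (else the loop never ends).
def Pre_getD (t : List Int) (d : List Int) (m : Int) : Prop :=
  ∀ i : Nat, i < d.length → d.getD i 0 < m → i < t.length ∧ 0 < t.getD i 0
instance (t : List Int) (d : List Int) (m : Int) : Decidable (Pre_getD t d m) := by unfold Pre_getD; infer_instance

def pvWitness_getD : List Int × List Int × Int := ([1], [0], 3)

def Spec_getD (t : List Int) (d : List Int) (m : Int) (out : List Int) : Prop := out = getD_alt t d m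
instance (t : List Int) (d : List Int) (m : Int) (out : List Int) : Decidable (Spec_getD t d m out) := by unfold Spec_getD; infer_instance

-- ===== CLAIM (what is proved, stated in full; the proofs are below) =====
def Claim_equal_getD : Prop := ∀ (t : List Int) (d : List Int) (m : Int), Dom_getD t d m → Pre_getD t d m → Spec_getD t d m (getD t d m)

-- ===== LEMMAS AND PROOFS =====

-- the per-index sorted run both programs produce for index i
def runOf (t : List Int) (d : List Int) (m : Int) (i : Int) : List Int :=
  if PySem.List.pyGetD d i 0 < m then
    PySem.List.pyRange (PySem.List.pyGetD d i 0) m (PySem.List.pyGetD t i 0)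
  else []

lemma merge2_eq_merge (a b : List Int) :
    merge2 a b = a.merge b (fun x y => decide (x ≤ y)) := by
  fun_induction merge2 a b <;> simp [*]

lemma merge2_nil (a : List Int) : merge2 a [] = a := by cases a <;> simp [merge2]

lemma merge2_perm (a b : List Int) : (merge2 a b).Perm (a ++ b) := by
  rw [merge2_eq_merge]; exact List.merge_perm_append _

lemma merge2_pairwise {a b : List Int} (ha : a.Pairwise (· ≤ ·)) (hb : b.Pairwise (· ≤ ·)) :
    (merge2 a b).Pairwise (· ≤ ·) := by
  rw [merge2_eq_merge]
  have := List.sorted_merge (le := fun x y : Int => decide (x ≤ y))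
    (by intro x y z hxy hyz; simp only [decide_eq_true_eq] at *; omega)
    (by intro x y; simp only [Bool.or_eq_true, decide_eq_true_eq]; omega)
    a b (by simpa using ha) (by simpa using hb)
  simpa using this

lemma pyRange_pos_nil {s : Int} (a b : Int) (hs : 0 < s) (hab : b ≤ a) :
    PySem.List.pyRange a b s = [] := by
  rw [PySem.List.pyRange_of_pos a b hs, if_neg (by omega)]
  simp

lemma pyRange_pos_cons {s : Int} (a b : Int) (hs : 0 < s) (hab : a < b) :
    PySem.List.pyRange a b s = a :: PySem.List.pyRange (a + s) b s := by
  rw [PySem.List.pyRange_of_pos a b hs, PySem.List.pyRange_of_pos (a + s) b hs,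
      if_pos hab]
  have hcount : (b - a + s - 1) / s =
      (if a + s < b then ((b - (a + s) + s - 1) / s) else 0) + 1 := by
    by_cases h : a + s < b
    · rw [if_pos h]
      have : b - a + s - 1 = (b - (a + s) + s - 1) + 1 * s := by ring
      rw [this, Int.add_mul_ediv_right _ _ (by omega)]
    · rw [if_neg h]
      have hx : b - a + s - 1 = (b - a - 1) + 1 * s := by ring
      rw [hx, Int.add_mul_ediv_right _ _ (by omega),
          Int.ediv_eq_zero_of_lt (by omega) (by omega)]
  rw [hcount]
  have htn : ((if a + s < b then ((b - (a + s) + s - 1) / s) else 0) + 1).toNat =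
      (if a + s < b then ((b - (a + s) + s - 1) / s) else 0).toNat + 1 := by
    by_cases h : a + s < b
    · rw [if_pos h] at *
      have : 0 ≤ (b - (a + s) + s - 1) / s := Int.ediv_nonneg (by omega) (by omega)
      omega
    · simp [if_neg h]
  have hifn : (if a + s < b then (b - (a + s) + s - 1) / s else 0).toNat
      = (if a + s < b then ((b - (a + s) + s - 1) / s).toNat else 0) := by
    split_ifs <;> simp
  rw [htn, hifn, List.range_succ_eq_map, List.map_cons, List.map_map]
  congr 1
  · simp
  · apply List.map_congr_left
    intro k _
    simp only [Function.comp_apply]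
    push_cast
    ring

lemma whileAppend_eq_pyRange (s m : Int) (hs : 0 < s) (c : Int) :
    whileAppend s m c = PySem.List.pyRange c m s := by
  fun_induction whileAppend s m c with
  | case1 c h ih =>
    rw [pyRange_pos_cons c m hs h.1, ih]
  | case2 c h =>
    rw [pyRange_pos_nil c m hs (by omega)]

lemma pairwise_le_pyRange_pos {s : Int} (a b : Int) (hs : 0 < s) :
    (PySem.List.pyRange a b s).Pairwise (· ≤ ·) := by
  rw [PySem.List.pyRange_of_pos a b hs]
  apply List.Pairwise.map (R := (· < ·)) _ _ List.pairwise_lt_range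
  intro k k' hkk'
  have hk : (k : Int) ≤ (k' : Int) := by exact_mod_cast hkk'.le
  nlinarith

lemma runOf_pairwise (t d : List Int) (m : Int) (hp : Pre_getD t d m)
    (i : Int) (h0 : 0 ≤ i) (hi : i < d.length) :
    (runOf t d m i).Pairwise (· ≤ ·) := by
  unfold runOf
  split_ifs with h
  · have hget : PySem.List.pyGetD d i 0 = d[i.toNat] :=
      PySem.List.pyGetD_eq_getElem _ _ h0 hi
    have hd : d.getD i.toNat 0 < m := by
      rw [List.getD_eq_getElem d 0 (by omega), ← hget]; exact h
    obtain ⟨hit, hts⟩ := hp i.toNat (by omega) hd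
    have hstep : 0 < PySem.List.pyGetD t i 0 := by
      rw [PySem.List.pyGetD_eq_getElem _ _ h0 (by omega),
          ← List.getD_eq_getElem t 0 hit]
      exact hts
    exact pairwise_le_pyRange_pos _ _ hstep
  · exact List.Pairwise.nil

lemma fold_merge_spec (R : Int → List Int) :
    ∀ (is : List Int) (acc : List Int), (∀ i ∈ is, (R i).Pairwise (· ≤ ·)) →
      acc.Pairwise (· ≤ ·) →
      (is.foldl (fun res i => merge2 res (R i)) acc).Pairwise (· ≤ ·) ∧
      (is.foldl (fun res i => merge2 res (R i)) acc).Perm (acc ++ is.flatMap R) := by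
  intro is
  induction is with
  | nil => intro acc _ hacc; simpa using hacc
  | cons i is ih =>
    intro acc hR hacc
    have hRi : (R i).Pairwise (· ≤ ·) := hR i (List.mem_cons_self ..)
    have hacc' : (merge2 acc (R i)).Pairwise (· ≤ ·) := merge2_pairwise hacc hRi
    obtain ⟨hpw, hperm⟩ := ih (merge2 acc (R i)) (fun j hj => hR j (List.mem_cons_of_mem _ hj)) hacc'
    refine ⟨hpw, ?_⟩
    simp only [List.foldl_cons, List.flatMap_cons]
    refine hperm.trans (((merge2_perm acc (R i)).append_right _).trans ?_)
    rw [List.append_assoc]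

-- ===== VERDICT (by name: the statement is the Claim_ definition above) =====
theorem getD_spec : Claim_equal_getD := by
  intro t d m _hdom hpre
  unfold Spec_getD getD getD_alt
  set is := PySem.List.pyRange 0 (d.length : Int) 1 with his
  have hmem : ∀ i ∈ is, 0 ≤ i ∧ i < (d.length : Int) := by
    intro i hi
    have := (PySem.List.mem_pyRange_one (a := 0) (b := (d.length : Int)) (x := i)).1 (his ▸ hi)
    omega
  -- A's fold body produces exactly runOf for every index in range
  have hA : is.foldl (fun result i =>
        result ++ whileAppend (PySem.List.pyGetD t i 0) m (PySem.List.pyGetD d i 0)) [] =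
      is.foldl (fun res i => res ++ runOf t d m i) [] := by
    apply PySem.List.foldl_congr_mem
    intro acc i hi
    obtain ⟨h0, hilen⟩ := hmem i hi
    congr 1
    unfold runOf
    split_ifs with h
    · have hget : PySem.List.pyGetD d i 0 = d[i.toNat] := PySem.List.pyGetD_eq_getElem _ _ h0 hilen
      have hd : d.getD i.toNat 0 < m := by
        rw [List.getD_eq_getElem d 0 (by omega), ← hget]; exact h
      obtain ⟨hit, hts⟩ := hpre i.toNat (by omega) hd
      have hstep : 0 < PySem.List.pyGetD t i 0 := by
        rw [PySem.List.pyGetD_eq_getElem _ _ h0 (by omega),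
            ← List.getD_eq_getElem t 0 hit]
        exact hts
      exact whileAppend_eq_pyRange _ _ hstep _
    · rw [whileAppend]
      simp [h]
  -- B's fold body is merging runOf
  have hB : is.foldl (fun result i =>
        if PySem.List.pyGetD d i 0 < m then
          merge2 result (PySem.List.pyRange (PySem.List.pyGetD d i 0) m (PySem.List.pyGetD t i 0))
        else result) [] =
      is.foldl (fun res i => merge2 res (runOf t d m i)) [] := by
    apply PySem.List.foldl_congr_mem
    intro acc i _
    unfold runOf
    split_ifs with h
    · rfl
    · rw [merge2_nil]
  dsimp only
  rw [hA, hB, PySem.List.foldl_append_eq_flatMap, List.nil_append]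
  obtain ⟨hpw, hperm⟩ := fold_merge_spec (runOf t d m) is []
    (fun i hi => runOf_pairwise t d m hpre i (hmem i hi).1 (hmem i hi).2)
    List.Pairwise.nil
  exact PySem.List.sorted_id_eq_of_perm_of_pairwise _ _ (by simpa using hperm) hpw
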